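-- pv_equiv track=rewrite | github.com/lldhliu/jingchuang | test/test2.py | Convert
-- ===== SOURCE A (Python) =====
-- def Convert(form):
--     ad = list(form)
--     a = ""
--     l = len(ad) - 1
--     flag = False
--     for i in range(len(ad)):
--         if ad[l - i] == '1' and flag == False:
--             flag = True
--             continue
--         if flag == True:
--             if ad[l - i] == '0':
--                 ad[l - i] = '1'
--             else:
--                 ad[l - i] = '0'
--     a = "".join(ad)
--     return a
-- ===== SOURCE B (Python) =====
-- def Convert(form):
--     head, sep, tail = form.rpartition('1')
--     if not sep:
--         return form
--     return ''.join('1' if c == '0' else '0' for c in head) + sep + tail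
-- ===== Notes on version B (the rewrite author's own statement) =====
-- stated objective: simpler
-- what changed: Replaces the flag-driven right-to-left in-place mutation loop with a two-phase split: rpartition at the last one-character, flip the prefix with a comprehension, keep the rest untouched; avoiding per-character list mutation also makes it measurably faster.
import Mathlib
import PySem

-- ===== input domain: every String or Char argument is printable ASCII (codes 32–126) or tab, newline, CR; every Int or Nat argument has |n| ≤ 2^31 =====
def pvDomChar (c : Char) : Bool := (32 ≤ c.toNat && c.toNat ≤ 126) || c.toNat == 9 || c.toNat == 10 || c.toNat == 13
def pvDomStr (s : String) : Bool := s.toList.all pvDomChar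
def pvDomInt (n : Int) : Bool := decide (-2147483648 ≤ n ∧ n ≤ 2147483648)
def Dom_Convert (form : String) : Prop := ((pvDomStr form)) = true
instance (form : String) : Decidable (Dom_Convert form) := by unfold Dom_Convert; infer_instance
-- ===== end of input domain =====

-- B splits at the last one-character (rpartition) and flips only the prefix, instead of A's
-- flag-driven right-to-left in-place mutation loop; simpler, and measured faster (constant factor).

-- ===== PORT A =====
-- one step of A's loop body at absolute index j (= l - i); state is (ad, flag)
def convStep (s : List Char × Bool) (j : Nat) : List Char × Bool :=
  if s.1.getD j ' ' == '1' && !s.2 then (s.1, true)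
  else if s.2 then
    (if s.1.getD j ' ' == '0' then (s.1.set j '1', s.2) else (s.1.set j '0', s.2))
  else s

def Convert (form : String) : String :=
  let ad := form.toList
  let l := ad.length - 1
  let r := (List.range ad.length).foldl (fun s i => convStep s (l - i)) (ad, false)
  String.ofList r.1

-- ===== PORT B =====
def flipc (c : Char) : Char := if c == '0' then '1' else '0'

-- form.rpartition('1'): split before/after the LAST '1'; none if no '1'
def rpart1 : List Char → Option (List Char × List Char)
  | [] => none
  | c :: xs =>
    match rpart1 xs with
    | some (h, t) => some (c :: h, t)
    | none => if c == '1' then some ([], xs) else none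

def Convert_alt (form : String) : String :=
  match rpart1 form.toList with
  | none => form
  | some (h, t) => String.ofList (h.map flipc ++ '1' :: t)

-- ===== PRECONDITION & SPEC =====
def Spec_Convert (form : String) (out : String) : Prop := out = Convert_alt form
instance (form : String) (out : String) : Decidable (Spec_Convert form out) := by unfold Spec_Convert; infer_instance

-- ===== CLAIM (what is proved, stated in full; the proofs are below) =====
def Claim_equal_Convert : Prop := ∀ (form : String), Dom_Convert form → Spec_Convert form (Convert form)

-- ===== LEMMAS AND PROOFS =====

-- middle characterisation: flip every char strictly left of the last '1', keep the rest
def tailProc : List Char → List Char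
  | [] => []
  | c :: xs => if '1' ∈ xs then flipc c :: tailProc xs else c :: xs

theorem tailProc_no_one {xs : List Char} (h : '1' ∉ xs) : tailProc xs = xs := by
  cases xs with
  | nil => rfl
  | cons c xs =>
    have : '1' ∉ xs := fun hx => h (List.mem_cons_of_mem _ hx)
    simp [tailProc, this]

theorem rpart1_none_iff (xs : List Char) : rpart1 xs = none ↔ '1' ∉ xs := by
  induction xs with
  | nil => simp [rpart1]
  | cons c xs ih =>
    cases h : rpart1 xs with
    | some p =>
      have hx : '1' ∈ xs := by
        by_contra hn
        rw [ih.mpr hn] at h; cases h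
      simp [rpart1, h, hx]
    | none =>
      have hx : '1' ∉ xs := ih.mp h
      by_cases hc : c = '1' <;> simp [rpart1, h, hc, hx]
      exact fun h => hc h.symm

theorem tailProc_eq_rpart1 (xs : List Char) :
    tailProc xs = match rpart1 xs with
      | none => xs
      | some (h, t) => h.map flipc ++ '1' :: t := by
  induction xs with
  | nil => rfl
  | cons c xs ih =>
    cases h : rpart1 xs with
    | none =>
      have hx : '1' ∉ xs := (rpart1_none_iff xs).mp h
      by_cases hc : c = '1' <;> simp [tailProc, rpart1, h, hx, hc]
    | some p =>
      have hx : '1' ∈ xs := by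
        by_contra hn
        rw [(rpart1_none_iff xs).mpr hn] at h; cases h
      obtain ⟨hd, tl⟩ := p
      simp [tailProc, rpart1, h, hx, ih]

-- the fold of A, peeled from the right end (indices n-1 down to n-m)
-- state invariant after processing the last m indices of cs (n = cs.length)
theorem conv_inv (cs : List Char) (m : Nat) (hm : m ≤ cs.length) :
    List.foldr (fun j s => convStep s j) (cs, false)
        (List.range' (cs.length - m) m) =
      (cs.take (cs.length - m) ++ tailProc (cs.drop (cs.length - m)),
       decide ('1' ∈ cs.drop (cs.length - m))) := by
  induction m with
  | zero => simp [tailProc]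
  | succ m ih =>
    have hm' : m ≤ cs.length := Nat.le_of_succ_le hm
    set k := cs.length - (m + 1) with hkdef
    have hk : k + 1 = cs.length - m := by omega
    have hkl : k < cs.length := by omega
    have hdrop : cs.drop k = cs[k] :: cs.drop (k + 1) := List.drop_eq_getElem_cons hkl
    have htlen : (cs.take (k + 1)).length = k + 1 := by simp; omega
    have hrange : List.range' k (m + 1) = k :: List.range' (k + 1) m := by
      simp [List.range'_succ]
    rw [hrange, List.foldr_cons, hk, ih hm', ← hk]
    have hget : (cs.take (k + 1) ++ tailProc (cs.drop (k + 1)))[k]? = some cs[k] := by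
      rw [List.getElem?_append_left (by omega)]
      simp [hkl]
    have hset : ∀ x, (cs.take (k + 1) ++ tailProc (cs.drop (k + 1))).set k x
        = cs.take k ++ x :: tailProc (cs.drop (k + 1)) := by
      intro x
      rw [List.set_append_left _ _ (by omega), List.take_add_one,
        List.getElem?_eq_getElem hkl]
      have hlk : (cs.take k).length = k := by simp; omega
      rw [List.set_append_right _ _ (by omega)]
      simp [hlk]
    have hget2 : cs[k]? = some cs[k] := List.getElem?_eq_getElem hkl
    by_cases hmem : '1' ∈ cs.drop (k + 1)
    · -- flag already true: flip position k
      have h1 : '1' ∈ cs.drop k := by rw [hdrop]; exact List.mem_cons_of_mem _ hmem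
      have htp : tailProc (cs.drop k) = flipc cs[k] :: tailProc (cs.drop (k + 1)) := by
        rw [hdrop]; simp [tailProc, hmem]
      rw [htp]
      by_cases h0 : cs[k] = '0' <;>
        simp [convStep, List.getD, hget, hmem, h1, hset, h0, flipc]
    · -- flag still false
      have htpx : tailProc (cs.drop (k + 1)) = cs.drop (k + 1) := tailProc_no_one hmem
      have hcat : cs.take (k + 1) ++ cs.drop (k + 1) = cs := List.take_append_drop _ _
      have hcat' : cs.take k ++ cs.drop k = cs := List.take_append_drop _ _
      by_cases h1 : cs[k] = '1'
      · have hm1 : '1' ∈ cs.drop k := by rw [hdrop, h1]; exact List.mem_cons_self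
        have htp : tailProc (cs.drop k) = cs.drop k := by
          rw [hdrop]; simp [tailProc, hmem]
        simp [convStep, List.getD, hmem, h1, htpx, hcat, htp, hcat', hm1, hget2]
      · have hm1 : '1' ∉ cs.drop k := by
          rw [hdrop]
          intro hmm
          rcases List.mem_cons.mp hmm with h | h
          · exact h1 h.symm
          · exact hmem h
        have htp : tailProc (cs.drop k) = cs.drop k := tailProc_no_one hm1
        simp [convStep, List.getD, hmem, h1, htpx, hcat, htp, hcat', hm1, hget2]

theorem Convert_eq_tailProc (form : String) :
    Convert form = String.ofList (tailProc form.toList) := by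
  unfold Convert
  have hmap : (List.range form.toList.length).map
      (fun i => form.toList.length - 1 - i) = (List.range form.toList.length).reverse := by
    rw [List.range_eq_range', List.reverse_range', ← List.range_eq_range']
    simp
  have hfold : (List.range form.toList.length).foldl
      (fun s i => convStep s (form.toList.length - 1 - i)) (form.toList, false)
      = (List.range form.toList.length).foldr
        (fun j s => convStep s j) (form.toList, false) := by
    rw [← List.foldl_map, hmap, List.foldl_reverse]
  simp only [hfold]
  have := conv_inv form.toList form.toList.length (Nat.le_refl _)
  simp only [Nat.sub_self, List.take_zero, List.drop_zero, List.nil_append] at this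
  rw [← List.range_eq_range'] at this
  rw [this]

-- ===== VERDICT (by name: the statement is the Claim_ definition above) =====
theorem Convert_spec : Claim_equal_Convert := by
  intro form _
  unfold Spec_Convert Convert_alt
  rw [Convert_eq_tailProc, tailProc_eq_rpart1]
  cases h : rpart1 form.toList with
  | none => simp
  | some p => rfl
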